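-- pv_equiv track=rewrite | github.com/kmlawson/shoebox | explore/ner/count_frequencies_consolidated.py | is_substring_match
-- ===== SOURCE A (Python) =====
-- def is_substring_match(short_name, long_name):
--     """Check if short_name is a meaningful substring of long_name"""
--     # Normalize for comparison
--     short = short_name.strip().lower()
--     long = long_name.strip().lower()
--
--     if short == long:
--         return False
--
--     # Check if short is contained in long as complete words
--     # E.g., "Alma" matches "Alma Wilson" but "ma" doesn't match "Alma Wilson"
--     short_words = short.split()
--     long_words = long.split()
--
--     # All words in short must appear consecutively in long
--     if len(short_words) >= len(long_words):
--         return False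
--
--     # Check for consecutive word match
--     for i in range(len(long_words) - len(short_words) + 1):
--         if long_words[i:i+len(short_words)] == short_words:
--             return True
--
--     return False
-- ===== SOURCE B (Python) =====
-- def is_substring_match(short_name, long_name):
--     """Check if short_name is a meaningful substring of long_name"""
--     short = short_name.strip().lower()
--     long = long_name.strip().lower()
--
--     if short == long:
--         return False
--
--     short_words = short.split()
--     long_words = long.split()
--
--     if len(short_words) >= len(long_words):
--         return False
--
--     if not short_words:
--         return True
--
--     # Whitespace-bounded substring search on the space-joined words
--     return ' '.join([''] + short_words + ['']) in ' '.join([''] + long_words + [''])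
-- ===== Notes on version B (the rewrite author's own statement) =====
-- stated objective: idiomatic
-- what changed: Replaces A's index loop comparing token-list windows by a single whitespace-bounded substring search: both names are space-joined with sentinel boundary spaces and the consecutive-word test becomes one 'in' on strings (with an explicit early True for an empty short word list).
import Mathlib
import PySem

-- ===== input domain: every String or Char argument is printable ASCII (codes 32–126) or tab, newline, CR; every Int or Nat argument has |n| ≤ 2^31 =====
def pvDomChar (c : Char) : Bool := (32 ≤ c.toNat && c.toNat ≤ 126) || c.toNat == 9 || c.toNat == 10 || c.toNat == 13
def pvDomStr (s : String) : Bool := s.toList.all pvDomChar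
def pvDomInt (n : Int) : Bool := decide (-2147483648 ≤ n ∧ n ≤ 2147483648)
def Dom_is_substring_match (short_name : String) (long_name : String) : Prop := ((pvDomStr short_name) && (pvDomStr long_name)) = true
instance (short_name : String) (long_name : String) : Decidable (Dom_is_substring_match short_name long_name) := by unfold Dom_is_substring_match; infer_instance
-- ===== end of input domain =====

-- B replaces A's index-loop over token-list windows by a whitespace-bounded substring
-- search on the space-joined words (idiomatic; same guards, same return value everywhere).

-- ===== PORT A =====
def is_substring_match (short_name : String) (long_name : String) : Bool :=
  let short := PySem.Str.lower (PySem.Str.strip short_name)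
  let long := PySem.Str.lower (PySem.Str.strip long_name)
  if short == long then false
  else
    let short_words := PySem.Str.split₀ short
    let long_words := PySem.Str.split₀ long
    if PySem.List.len short_words ≥ PySem.List.len long_words then false
    else
      -- for i in range(len(long_words) - len(short_words) + 1): if slice == short_words: return True / return False
      (PySem.List.pyRange 0 (PySem.List.len long_words - PySem.List.len short_words + 1) 1).any
        (fun i => PySem.List.slice long_words (some i) (some (i + PySem.List.len short_words)) == short_words)

-- ===== PORT B =====
def is_substring_match_alt (short_name : String) (long_name : String) : Bool :=
  let short := PySem.Str.lower (PySem.Str.strip short_name)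
  let long := PySem.Str.lower (PySem.Str.strip long_name)
  if short == long then false
  else
    let short_words := PySem.Str.split₀ short
    let long_words := PySem.Str.split₀ long
    if PySem.List.len short_words ≥ PySem.List.len long_words then false
    else if short_words.isEmpty then true
    else
      PySem.Str.isIn (PySem.Str.join " " ([""] ++ short_words ++ [""]))
                     (PySem.Str.join " " ([""] ++ long_words ++ [""]))

-- ===== PRECONDITION & SPEC =====
def Spec_is_substring_match (short_name : String) (long_name : String) (out : Bool) : Prop := out = is_substring_match_alt short_name long_name
instance (short_name : String) (long_name : String) (out : Bool) : Decidable (Spec_is_substring_match short_name long_name out) := by unfold Spec_is_substring_match; infer_instance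

-- ===== CLAIM (what is proved, stated in full; the proofs are below) =====
def Claim_equal_is_substring_match : Prop := ∀ (short_name : String) (long_name : String), Dom_is_substring_match short_name long_name → Spec_is_substring_match short_name long_name (is_substring_match short_name long_name)

-- ===== LEMMAS AND PROOFS =====

def pvJ (S : List (List Char)) : List Char := S.flatMap (fun w => w ++ [' '])

theorem pv_join_eq (S : List (List Char)) :
    List.intercalate [' '] ([] :: (S ++ [[]])) = ' ' :: pvJ S := by
  induction S with
  | nil => simp [List.intercalate, List.intersperse, pvJ]
  | cons s S ih =>
    have h1 : List.intercalate [' '] ([] :: (s :: (S ++ [[]]))) =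
        [] ++ [' '] ++ List.intercalate [' '] (s :: (S ++ [[]])) := by
      simp [List.intercalate, List.intersperse]
    have h2 : List.intercalate [' '] ((s :: (S ++ [[]]))) =
        s ++ [' '] ++ List.intercalate [' '] (S ++ [[]]) := by
      cases S <;> simp [List.intercalate, List.intersperse]
    have h3 : List.intercalate [' '] ([] :: (S ++ [[]])) =
        [] ++ [' '] ++ List.intercalate [' '] (S ++ [[]]) := by
      cases S <;> simp [List.intercalate, List.intersperse]
    simp only [List.cons_append] at ih ⊢
    rw [h1, h2]
    rw [h3] at ih
    simp only [List.nil_append] at ih ⊢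
    have hx : List.intercalate [' '] (S ++ [[]]) = pvJ S := by simpa using ih
    rw [hx]
    simp [pvJ]

theorem pv_exists_iff {α : Type} (S L : List α) (h : S.length ≤ L.length) :
    (∃ k < L.length - S.length + 1, (L.drop k).take S.length = S) ↔ S <:+: L := by
  constructor
  · rintro ⟨k, _, hk⟩
    exact hk ▸ ((List.take_prefix _ _).isInfix.trans (List.drop_suffix k L).isInfix)
  · rintro ⟨u, v, huv⟩
    refine ⟨u.length, by subst huv; simp; omega, ?_⟩
    subst huv
    have : List.drop u.length (u ++ S ++ v) = S ++ v := by
      rw [List.append_assoc, List.drop_left]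
    rw [this, List.take_left' rfl]

theorem pv_tok (s : List Char) : ∀ (l u v : List Char), ' ' ∉ s → ' ' ∉ l →
    (s ++ ' ' :: u <+: l ++ ' ' :: v) → s = l := by
  induction s with
  | nil =>
    intro l u v _ hl h
    cases l with
    | nil => rfl
    | cons b l' =>
      simp only [List.nil_append, List.cons_append, List.cons_prefix_cons] at h
      exact absurd (h.1 ▸ List.mem_cons_self) hl
  | cons a s' ih =>
    intro l u v hs hl h
    cases l with
    | nil =>
      simp only [List.cons_append, List.nil_append, List.cons_prefix_cons] at h
      exact absurd (h.1 ▸ List.mem_cons_self) hs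
    | cons b l' =>
      simp only [List.cons_append, List.cons_prefix_cons] at h
      have := ih l' u v (fun hm => hs (List.mem_cons_of_mem _ hm)) (fun hm => hl (List.mem_cons_of_mem _ hm)) h.2
      rw [h.1, this]

theorem pv_prefix_iff (S : List (List Char)) : ∀ (L : List (List Char)),
    (∀ w ∈ S, ' ' ∉ w) → (∀ w ∈ L, ' ' ∉ w) → (pvJ S <+: pvJ L ↔ S <+: L) := by
  induction S with
  | nil => intro L _ _; simp [pvJ]
  | cons s S' ih =>
    intro L hS hL
    cases L with
    | nil =>
      simp only [pvJ, List.flatMap_cons, List.flatMap_nil]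
      constructor
      · intro h
        have := h.length_le
        simp at this
      · intro h
        exact absurd h (by simp)
    | cons l L' =>
      have hJ : pvJ (s :: S') = s ++ ' ' :: pvJ S' := by simp [pvJ]
      have hJ' : pvJ (l :: L') = l ++ ' ' :: pvJ L' := by simp [pvJ]
      rw [hJ, hJ', List.cons_prefix_cons]
      constructor
      · intro h
        have heq : s = l := pv_tok s l (pvJ S') (pvJ L') (hS s (by simp)) (hL l (by simp)) h
        subst heq
        rw [List.prefix_append_right_inj, List.cons_prefix_cons] at h
        refine ⟨rfl, ?_⟩
        exact (ih L' (fun w hw => hS w (by simp [hw])) (fun w hw => hL w (by simp [hw]))).mp h.2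
      · rintro ⟨rfl, h⟩
        rw [List.prefix_append_right_inj, List.cons_prefix_cons]
        exact ⟨rfl, (ih L' (fun w hw => hS w (by simp [hw])) (fun w hw => hL w (by simp [hw]))).mpr h⟩

theorem pv_step (l r t : List Char) (hl : ' ' ∉ l) :
    (' ' :: r) <:+: (l ++ ' ' :: t) ↔ (' ' :: r) <:+: (' ' :: t) := by
  constructor
  · rintro ⟨u, v, huv⟩
    have huv' : u ++ (' ' :: (r ++ v)) = l ++ ' ' :: t := by
      simpa [List.append_assoc] using huv
    rcases List.append_eq_append_iff.mp huv' with ⟨as, hys, hxs⟩ | ⟨bs, hu, ht⟩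
    · cases as with
      | nil =>
        simp only [List.append_nil, List.nil_append] at hys hxs
        refine ⟨[], v, ?_⟩
        simp only [List.cons.injEq] at hxs
        simp [hxs.2]
      | cons x as' =>
        have hx : x = ' ' := by
          simp only [List.cons_append] at hxs
          exact (List.cons.injEq .. ▸ hxs).1.symm ▸ rfl
        exact absurd (hys ▸ (by simp [hx] : (' ':Char) ∈ u ++ x :: as')) hl
    · refine ⟨bs, v, ?_⟩
      simpa [List.append_assoc] using ht.symm
  · rintro ⟨u, v, huv⟩
    exact ⟨l ++ u, v, by rw [← huv]; simp⟩

theorem pv_main (S : List (List Char)) : ∀ (L : List (List Char)),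
    (∀ w ∈ S, ' ' ∉ w) → (∀ w ∈ L, ' ' ∉ w) →
    ((' ' :: pvJ S) <:+: (' ' :: pvJ L) ↔ S <:+: L) := by
  intro L
  induction L with
  | nil =>
    intro hS _
    cases S with
    | nil => simp [pvJ]
    | cons s S' =>
      simp only [pvJ, List.flatMap_cons, List.flatMap_nil]
      constructor
      · intro h
        have := h.length_le
        simp at this
      · intro h
        have := h.length_le
        simp at this
  | cons l L' ih =>
    intro hS hL
    have hJ' : pvJ (l :: L') = l ++ ' ' :: pvJ L' := by simp [pvJ]
    rw [hJ', List.infix_cons_iff, List.infix_cons_iff, List.cons_prefix_cons]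
    have h1 : pvJ S <+: l ++ ' ' :: pvJ L' ↔ S <+: l :: L' := by
      rw [show l ++ ' ' :: pvJ L' = pvJ (l :: L') from hJ'.symm]
      exact pv_prefix_iff S (l :: L') hS hL
    rw [pv_step l (pvJ S) (pvJ L') (hL l (by simp))]
    rw [ih hS (fun w hw => hL w (by simp [hw]))]
    simp only [true_and]
    rw [h1]

theorem pv_split0_go_nosp (rest : List Char) : ∀ (cur : List Char) (acc : List (List Char)),
    (∀ w ∈ acc, ∀ c ∈ w, PySem.Chars.isspace c = false) →
    (∀ c ∈ cur, PySem.Chars.isspace c = false) →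
    ∀ w ∈ PySem.Chars.split₀.go rest cur acc, ∀ c ∈ w, PySem.Chars.isspace c = false := by
  induction rest with
  | nil =>
    intro cur acc hacc hcur w hw
    simp only [PySem.Chars.split₀.go] at hw
    split at hw
    · exact hacc w (by simpa using hw)
    · simp only [List.mem_reverse, List.mem_cons] at hw
      rcases hw with h | h
      · subst h; intro c hc; exact hcur c (by simpa using hc)
      · exact hacc w h
  | cons a rest ih =>
    intro cur acc hacc hcur w hw
    simp only [PySem.Chars.split₀.go] at hw
    split at hw
    · split at hw
      · exact ih [] acc hacc (by simp) w hw
      · refine ih [] ((cur.reverse) :: acc) ?_ (by simp) w hw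
        intro w' hw' c hc
        rcases List.mem_cons.mp hw' with h | h
        · exact hcur c (by simpa [h] using hc)
        · exact hacc w' h c hc
    · refine ih (a :: cur) acc hacc ?_ w hw
      intro c hc
      rcases List.mem_cons.mp hc with h | h
      · subst h; rename_i hsp; simpa using hsp
      · exact hcur c h

theorem pv_split0_nosp (cs : List Char) :
    ∀ w ∈ PySem.Chars.split₀ cs, ' ' ∉ w := by
  intro w hw hmem
  have := pv_split0_go_nosp cs [] [] (by simp) (by simp) w hw ' ' hmem
  simp [PySem.Chars.isspace] at this

theorem pv_infix_map_iff (sw lw : List String) :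
    sw <:+: lw ↔ sw.map String.toList <:+: lw.map String.toList := by
  constructor
  · rintro ⟨u, v, huv⟩
    exact ⟨u.map String.toList, v.map String.toList, by rw [← huv]; simp⟩
  · rintro ⟨u, v, huv⟩
    refine ⟨lw.take u.length, lw.drop (u.length + sw.length), ?_⟩
    have hinj : Function.Injective (List.map String.toList) :=
      List.map_injective_iff.mpr (fun a b h => String.toList_inj.mp h)
    apply hinj
    rw [← huv]
    simp only [List.map_append, List.map_take, List.map_drop, ← huv]
    have h1 : List.take u.length (u ++ sw.map String.toList ++ v) = u := by
      rw [List.append_assoc]; exact List.take_left' rfl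
    have h2 : List.drop (u.length + sw.length) (u ++ sw.map String.toList ++ v) = v :=
      List.drop_left' (by simp)
    rw [h1, h2]

theorem pv_loop_iff (sw lw : List String) (h : sw.length ≤ lw.length) :
    ((PySem.List.pyRange 0 (PySem.List.len lw - PySem.List.len sw + 1) 1).any
        (fun i => PySem.List.slice lw (some i) (some (i + PySem.List.len sw)) == sw)) = true
      ↔ sw <:+: lw := by
  rw [PySem.List.pyRange_one, List.any_map]
  have hm : ((PySem.List.len lw - PySem.List.len sw + 1 - 0)).toNat = lw.length - sw.length + 1 := by
    simp only [PySem.List.len_eq]; omega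
  rw [hm, ← pv_exists_iff sw lw h]
  rw [List.any_eq_true]
  constructor
  · rintro ⟨k, hk, hp⟩
    refine ⟨k, List.mem_range.mp hk, ?_⟩
    simp only [Function.comp_apply, zero_add, PySem.List.len_eq,
      PySem.List.slice_natCast_add, beq_iff_eq] at hp
    exact hp
  · rintro ⟨k, hk, hp⟩
    refine ⟨k, List.mem_range.mpr hk, ?_⟩
    simp only [Function.comp_apply, zero_add, PySem.List.len_eq,
      PySem.List.slice_natCast_add, beq_iff_eq]
    exact hp

theorem pv_nosp_words (s : String) : ∀ w ∈ (PySem.Str.split₀ s).map String.toList, ' ' ∉ w := by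
  intro w hw
  rw [PySem.Str.split₀_map_toList] at hw
  exact pv_split0_nosp s.toList w hw

theorem pv_needle_toList (sw : List String) :
    (PySem.Str.join " " ([""] ++ sw ++ [""])).toList = ' ' :: pvJ (sw.map String.toList) := by
  rw [PySem.Str.toList_join]
  have h1 : ([""] ++ sw ++ [""]).map String.toList = [] :: (sw.map String.toList ++ [[]]) := by
    simp
  rw [h1]
  have h2 : (" " : String).toList = [' '] := by decide
  simp only [PySem.Chars.join, h2]
  exact pv_join_eq _

theorem pv_branch_empty (short long : String)
    (hlt : (PySem.Str.split₀ short).length < (PySem.Str.split₀ long).length)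
    (he : (PySem.Str.split₀ short).isEmpty) :
    ((PySem.List.pyRange 0 (PySem.List.len (PySem.Str.split₀ long) - PySem.List.len (PySem.Str.split₀ short) + 1) 1).any
        (fun i => PySem.List.slice (PySem.Str.split₀ long) (some i) (some (i + PySem.List.len (PySem.Str.split₀ short))) == PySem.Str.split₀ short))
      = true :=
  (pv_loop_iff _ _ (le_of_lt hlt)).mpr
    (by rw [List.isEmpty_iff.mp he]; exact List.nil_infix)

theorem pv_branch_isin (short long : String)
    (hlt : (PySem.Str.split₀ short).length < (PySem.Str.split₀ long).length) :
    ((PySem.List.pyRange 0 (PySem.List.len (PySem.Str.split₀ long) - PySem.List.len (PySem.Str.split₀ short) + 1) 1).any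
        (fun i => PySem.List.slice (PySem.Str.split₀ long) (some i) (some (i + PySem.List.len (PySem.Str.split₀ short))) == PySem.Str.split₀ short))
      = PySem.Str.isIn (PySem.Str.join " " ([""] ++ PySem.Str.split₀ short ++ [""]))
                       (PySem.Str.join " " ([""] ++ PySem.Str.split₀ long ++ [""])) := by
  set sw := PySem.Str.split₀ short with hsw
  set lw := PySem.Str.split₀ long with hlw
  rw [Bool.eq_iff_iff]
  rw [pv_loop_iff sw lw (le_of_lt hlt), PySem.Str.isIn_iff_infix]
  rw [pv_infix_map_iff]
  rw [pv_needle_toList sw, pv_needle_toList lw]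
  exact (pv_main (sw.map String.toList) (lw.map String.toList)
    (hsw ▸ pv_nosp_words short) (hlw ▸ pv_nosp_words long)).symm

theorem pv_core (sn ln : String) : is_substring_match sn ln = is_substring_match_alt sn ln := by
  simp only [is_substring_match, is_substring_match_alt]
  split_ifs with h1 h2 h3
  · rfl
  · rfl
  · exact pv_branch_empty _ _ (by simp only [PySem.List.len_eq, ge_iff_le, not_le] at h2; exact_mod_cast h2) h3
  · exact pv_branch_isin _ _ (by simp only [PySem.List.len_eq, ge_iff_le, not_le] at h2; exact_mod_cast h2)

-- ===== VERDICT (by name: the statement is the Claim_ definition above) =====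
theorem is_substring_match_spec : Claim_equal_is_substring_match :=
  fun sn ln _ => pv_core sn ln
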